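-- pv_equiv track=rewrite | github.com/blockchain-etl/sonic-etl | indexing_coordinator/publish_ranges.py | chunk_range
-- ===== SOURCE A (Python) =====
-- from typing import Any, AnyStr, Generator
--
-- def chunk_range(start: int, end: int, chunk_size:int=1000) -> Generator[tuple[int, int], None, None]:
--     ''' Yields chunk_size ranges from start to end.  Start and end inclusive,
--     meaning all values in [start, end] will be returned.  Returns tuples
--     (chunk_start, chunk_end), assume the chunk is inclusive, where the next
--     chunk will be start with (chunk_end).  Given a chunk_size of 1, the chunk_start
--     and chunk_end will be equal, and each value will be iterated as a pair.'''
--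
--     if start > end:
--         raise ValueError(f"Start ({start}) cannot be > than End ({end})")
--     elif (end - start) < chunk_size:
--         yield (start, end)
--         return
--     elif chunk_size == 1:
--         for i in range(start,end+1):
--             yield (i,i)
--     elif chunk_size <= 0:
--         raise ValueError(f"chunk_size must be a positive integer, not {chunk_size}")
--     else:
--         # Yield each chunk, where the start
--         chunk_start = start
--         while chunk_start <= end:
--             chunk_end = min(chunk_start + chunk_size - 1, end)
--             yield (chunk_start, chunk_end)
--             chunk_start = chunk_end + 1
--         return
-- ===== SOURCE B (Python) =====
-- def _split(start, end, chunk_size):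
--     '''Divide and conquer: if one chunk remains, yield it; otherwise split the
--     range at a chunk-aligned midpoint and recurse on both halves.  Correct
--     because the midpoint is always of the form start + k*chunk_size, so every
--     chunk boundary of the whole range is preserved in the sub-problems.'''
--     n_chunks = (end - start) // chunk_size + 1
--     if n_chunks == 1:
--         yield (start, end)
--     else:
--         mid = start + (n_chunks // 2) * chunk_size
--         yield from _split(start, mid - 1, chunk_size)
--         yield from _split(mid, end, chunk_size)
--
--
-- def chunk_range(start: int, end: int, chunk_size: int = 1000):
--     '''Yield inclusive (chunk_start, chunk_end) sub-ranges of [start, end].'''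
--     if start > end:
--         raise ValueError(f"Start ({start}) cannot be > than End ({end})")
--     if chunk_size <= 0:
--         raise ValueError(f"chunk_size must be a positive integer, not {chunk_size}")
--     yield from _split(start, end, chunk_size)
-- ===== Notes on version B (the rewrite author's own statement) =====
-- stated objective: alternative
-- what changed: Replaces A's linear stateful while-loop (each chunk_start re-derived from the previous chunk_end, plus redundant chunk_size==1 and small-range special cases) with a divide-and-conquer recursion that counts chunks by floor division and splits the range at a chunk-aligned midpoint, recursing on both halves.
import Mathlib
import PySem

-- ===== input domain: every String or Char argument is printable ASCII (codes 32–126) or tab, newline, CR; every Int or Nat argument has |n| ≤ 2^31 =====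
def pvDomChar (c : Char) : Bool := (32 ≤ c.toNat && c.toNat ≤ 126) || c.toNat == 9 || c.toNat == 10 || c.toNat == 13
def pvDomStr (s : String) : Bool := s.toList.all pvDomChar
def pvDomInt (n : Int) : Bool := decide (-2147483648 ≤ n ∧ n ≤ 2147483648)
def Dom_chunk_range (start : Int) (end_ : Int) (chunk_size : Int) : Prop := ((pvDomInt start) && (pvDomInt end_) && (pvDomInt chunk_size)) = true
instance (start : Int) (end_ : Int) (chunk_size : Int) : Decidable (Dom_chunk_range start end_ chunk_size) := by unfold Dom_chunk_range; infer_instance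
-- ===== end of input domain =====

-- B replaces A's linear stateful while loop (and its special cases) by a divide-and-conquer
-- recursion that splits the range at a chunk-aligned midpoint (alternative; same cost).


-- ===== PORT A =====
-- A's while-loop: yields (chunk_start, min(chunk_start+chunk_size-1, end)) and restarts at
-- chunk_end+1.  fuel only makes the recursion structural; chunk_range supplies enough of it
-- (the loop advances by chunk_size ≥ 1 each iteration, and never runs with chunk_size ≤ 0).
def chunkLoopA (fuel : Nat) (end_ : Int) (chunk_size : Int) (chunk_start : Int) : List (Int × Int) :=
  match fuel with
  | 0 => []
  | fuel + 1 =>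
    if chunk_start ≤ end_ then
      (chunk_start, min (chunk_start + chunk_size - 1) end_) ::
        chunkLoopA fuel end_ chunk_size (min (chunk_start + chunk_size - 1) end_ + 1)
    else []

-- transliteration of A; on the raising branches (excluded by Pre_) it returns [].
def chunk_range (start : Int) (end_ : Int) (chunk_size : Int) : List (Int × Int) :=
  if start > end_ then []
  else if end_ - start < chunk_size then [(start, end_)]
  else if chunk_size = 1 then (PySem.List.pyRange start (end_ + 1) 1).map (fun i => (i, i))
  else if chunk_size ≤ 0 then []
  else chunkLoopA ((end_ + 1 - start).toNat) end_ chunk_size start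

-- ===== PORT B =====
-- B: divide and conquer (_split in Source B): one chunk → yield it; otherwise split at the
-- chunk-aligned midpoint start + (n_chunks//2)*chunk_size and recurse on both halves.
-- fuel only makes the recursion structural (chunk_range_alt supplies enough); the
-- impossible-input guard (c ≤ 0 or end_ < start) is likewise never reached under Pre_.
def splitB (fuel : Nat) (start : Int) (end_ : Int) (c : Int) : List (Int × Int) :=
  match fuel with
  | 0 => []
  | fuel + 1 =>
    if c ≤ 0 ∨ end_ < start then []
    else if PySem.Int.floordiv (end_ - start) c + 1 = 1 then [(start, end_)]
    else
      splitB fuel start (start + PySem.Int.floordiv (PySem.Int.floordiv (end_ - start) c + 1) 2 * c - 1) c ++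
      splitB fuel (start + PySem.Int.floordiv (PySem.Int.floordiv (end_ - start) c + 1) 2 * c) end_ c

-- transliteration of B; [] on the raising branches (excluded by Pre_).
def chunk_range_alt (start : Int) (end_ : Int) (chunk_size : Int) : List (Int × Int) :=
  if start > end_ then []
  else if chunk_size ≤ 0 then []
  else splitB ((end_ - start).toNat + 1) start end_ chunk_size

-- ===== PRECONDITION & SPEC =====
-- Pre_ excludes exactly the inputs on which A raises ValueError: start > end, or a non-positive chunk_size.
def Pre_chunk_range (start : Int) (end_ : Int) (chunk_size : Int) : Prop :=
  start ≤ end_ ∧ 1 ≤ chunk_size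
instance (start : Int) (end_ : Int) (chunk_size : Int) : Decidable (Pre_chunk_range start end_ chunk_size) := by unfold Pre_chunk_range; infer_instance
def pvWitness_chunk_range : Int × Int × Int := (0, 10, 3)
def Spec_chunk_range (start : Int) (end_ : Int) (chunk_size : Int) (out : List (Int × Int)) : Prop := out = chunk_range_alt start end_ chunk_size
instance (start : Int) (end_ : Int) (chunk_size : Int) (out : List (Int × Int)) : Decidable (Spec_chunk_range start end_ chunk_size out) := by unfold Spec_chunk_range; infer_instance

-- ===== CLAIM =====
def Claim_equal_chunk_range : Prop := ∀ (start : Int) (end_ : Int) (chunk_size : Int), Dom_chunk_range start end_ chunk_size → Pre_chunk_range start end_ chunk_size → Spec_chunk_range start end_ chunk_size (chunk_range start end_ chunk_size)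

-- ===== LEMMAS AND PROOFS =====

-- canonical chunk list (proof-side only): every chunk start, paired with its clipped end
def chunksOf (end_ : Int) (c : Int) (s : Int) : List (Int × Int) :=
  (PySem.List.pyRange s (end_ + 1) c).map (fun x => (x, min (x + c - 1) end_))

-- positive-step cons unfolding of pyRange
theorem pyRange_pos_cons (a b s : Int) (hs : 0 < s) (hab : a < b) :
    PySem.List.pyRange a b s = a :: PySem.List.pyRange (a + s) b s := by
  rw [PySem.List.pyRange_of_pos _ _ hs, PySem.List.pyRange_of_pos _ _ hs]
  have hdiv : (b - a + s - 1) / s = (b - a - 1) / s + 1 := by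
    have h := Int.add_mul_ediv_right (b - a - 1) 1 (by omega : s ≠ 0)
    rw [show b - a + s - 1 = b - a - 1 + 1 * s by ring, h]
  by_cases h2 : a + s < b
  · simp only [if_pos hab, if_pos h2, show b - (a + s) + s - 1 = b - a - 1 by ring, hdiv]
    have hn : 0 ≤ (b - a - 1) / s := Int.ediv_nonneg (by omega) (by omega)
    rw [show ((b - a - 1) / s + 1).toNat = ((b - a - 1) / s).toNat + 1 by omega]
    rw [List.range_succ_eq_map, List.map_cons, List.map_map]
    congr 1
    · simp
    · exact List.map_congr_left (fun k _ => by simp [Function.comp]; ring)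
  · have h0 : (b - a - 1) / s = 0 :=
      Int.ediv_eq_zero_of_lt (by omega) (by omega)
    simp only [if_pos hab, if_neg h2, hdiv, h0]
    simp

theorem pyRange_pos_nil (a b s : Int) (hs : 0 < s) (hab : b ≤ a) :
    PySem.List.pyRange a b s = [] := by
  rw [PySem.List.pyRange_of_pos _ _ hs]
  simp [show ¬ a < b by omega]

-- one chunk left: the canonical list is exactly [(s, end_)]
theorem chunksOf_small {end_ c s : Int} (hc : 1 ≤ c) (hse : s ≤ end_)
    (hsm : end_ - s < c) : chunksOf end_ c s = [(s, end_)] := by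
  unfold chunksOf
  rw [pyRange_pos_cons _ _ _ (by omega) (by omega),
      pyRange_pos_nil _ _ _ (by omega) (by omega)]
  simp only [List.map_cons, List.map_nil]
  rw [show min (s + c - 1) end_ = end_ by omega]

-- the canonical list splits at any chunk-aligned point mid (c ∣ mid - s)
theorem chunksOf_append {c : Int} (hc : 1 ≤ c) (end_ mid : Int) (hme : mid ≤ end_) :
    ∀ (n : Nat) (s : Int), (mid - s).toNat ≤ n → s ≤ mid → c ∣ (mid - s) →
      chunksOf end_ c s = chunksOf (mid - 1) c s ++ chunksOf end_ c mid := by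
  intro n
  induction n with
  | zero =>
    intro s hn hs _
    have heq : s = mid := by omega
    rw [heq]
    unfold chunksOf
    rw [pyRange_pos_nil mid (mid - 1 + 1) c (by omega) (by omega)]
    simp
  | succ m ih =>
    intro s hn hs hdvd
    by_cases heq : s = mid
    · rw [heq]
      unfold chunksOf
      rw [pyRange_pos_nil mid (mid - 1 + 1) c (by omega) (by omega)]
      simp
    · have hpos : 0 < mid - s := by omega
      have hcs : c ≤ mid - s := Int.le_of_dvd hpos hdvd
      have hL : chunksOf end_ c s = (s, min (s + c - 1) end_) :: chunksOf end_ c (s + c) := by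
        unfold chunksOf
        rw [pyRange_pos_cons s (end_ + 1) c (by omega) (by omega), List.map_cons]
      have hR : chunksOf (mid - 1) c s = (s, min (s + c - 1) (mid - 1)) :: chunksOf (mid - 1) c (s + c) := by
        unfold chunksOf
        rw [pyRange_pos_cons s (mid - 1 + 1) c (by omega) (by omega), List.map_cons]
      rw [hL, hR, show min (s + c - 1) end_ = s + c - 1 by omega,
          show min (s + c - 1) (mid - 1) = s + c - 1 by omega,
          ih (s + c) (by omega) (by omega)
            (by obtain ⟨k, hk⟩ := hdvd; exact ⟨k - 1, by linarith [hk]⟩)]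
      simp

-- A's loop (with enough fuel) computes the canonical chunk list
theorem chunkLoopA_eq {c : Int} (hc : 1 ≤ c) (end_ : Int) :
    ∀ (fuel : Nat) (s : Int), (end_ + 1 - s).toNat ≤ fuel →
      chunkLoopA fuel end_ c s = chunksOf end_ c s := by
  intro fuel
  induction fuel with
  | zero =>
    intro s hn
    unfold chunkLoopA chunksOf
    rw [pyRange_pos_nil _ _ _ (by omega) (by omega)]
    simp
  | succ m ih =>
    intro s hn
    rw [chunkLoopA]
    by_cases h : s ≤ end_
    · rw [if_pos h]
      by_cases hfull : s + c - 1 ≤ end_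
      · rw [show min (s + c - 1) end_ = s + c - 1 by omega]
        unfold chunksOf
        rw [pyRange_pos_cons s (end_ + 1) c (by omega) (by omega), List.map_cons,
            show s + c - 1 + 1 = s + c by ring, ← chunksOf, ih (s + c) (by omega),
            show min (s + c - 1) end_ = s + c - 1 by omega]
      · rw [show min (s + c - 1) end_ = end_ by omega, ih (end_ + 1) (by omega),
            chunksOf_small hc h (by omega)]
        unfold chunksOf
        rw [pyRange_pos_nil (end_ + 1) (end_ + 1) c (by omega) (by omega)]
        simp
    · rw [if_neg h]
      unfold chunksOf
      rw [pyRange_pos_nil _ _ _ (by omega) (by omega)]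
      simp

-- bounds on the chunk-aligned midpoint offset
theorem splitB_bounds {start end_ c : Int} (hc : 0 < c) (hse : start ≤ end_)
    (h1 : PySem.Int.floordiv (end_ - start) c + 1 ≠ 1) :
    c ≤ PySem.Int.floordiv (PySem.Int.floordiv (end_ - start) c + 1) 2 * c ∧
    PySem.Int.floordiv (PySem.Int.floordiv (end_ - start) c + 1) 2 * c ≤ end_ - start := by
  rw [PySem.Int.floordiv_eq_ediv_of_pos hc] at h1 ⊢
  rw [PySem.Int.floordiv_eq_ediv_of_pos (show (0:ℤ) < 2 by norm_num)]
  set d := (end_ - start) / c with hd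
  have hd0 : 0 ≤ d := Int.ediv_nonneg (by omega) hc.le
  have hadd := Int.mul_ediv_add_emod (end_ - start) c
  have hr := Int.emod_nonneg (end_ - start) (ne_of_gt hc)
  have hdc : d * c ≤ end_ - start := by nlinarith [hadd, hr]
  have hd1 : 1 ≤ d := by omega
  have hk : 1 ≤ (d + 1) / 2 ∧ (d + 1) / 2 ≤ d := by omega
  constructor
  · exact (le_mul_iff_one_le_left hc).mpr hk.1
  · exact le_trans (mul_le_mul_of_nonneg_right hk.2 hc.le) hdc

-- B's divide-and-conquer (with enough fuel) computes the canonical chunk list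
theorem splitB_eq {c : Int} (hc : 1 ≤ c) :
    ∀ (fuel : Nat) (start end_ : Int), (end_ - start).toNat < fuel → start ≤ end_ →
      splitB fuel start end_ c = chunksOf end_ c start := by
  intro fuel
  induction fuel with
  | zero => intro start end_ hn hse; omega
  | succ m ih =>
    intro start end_ hn hse
    rw [splitB, if_neg (by omega)]
    by_cases h1 : PySem.Int.floordiv (end_ - start) c + 1 = 1
    · rw [if_pos h1]
      rw [PySem.Int.floordiv_eq_ediv_of_pos (show (0:ℤ) < c by omega)] at h1
      have hadd := Int.mul_ediv_add_emod (end_ - start) c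
      have hr := Int.emod_nonneg (end_ - start) (show c ≠ 0 by omega)
      have hrlt := Int.emod_lt_of_pos (end_ - start) (show 0 < c by omega)
      have hd0 : (end_ - start) / c = 0 := by omega
      rw [hd0, mul_zero, zero_add] at hadd
      have hsm : end_ - start < c := by omega
      exact (chunksOf_small hc hse hsm).symm
    · rw [if_neg h1]
      obtain ⟨hb1, hb2⟩ := splitB_bounds (by omega) hse h1
      set k := PySem.Int.floordiv (PySem.Int.floordiv (end_ - start) c + 1) 2 with hk
      have hdvd : c ∣ (start + k * c - start) := ⟨k, by ring⟩
      rw [ih start (start + k * c - 1) (by omega) (by omega),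
          ih (start + k * c) end_ (by omega) (by omega)]
      exact (chunksOf_append hc end_ (start + k * c) (by omega)
        (start + k * c - start).toNat start le_rfl (by omega) hdvd).symm

-- ===== VERDICT =====
theorem chunk_range_spec : Claim_equal_chunk_range := by
  intro start end_ chunk_size _ hpre
  obtain ⟨hle, hcs⟩ := hpre
  unfold Spec_chunk_range chunk_range chunk_range_alt
  simp only [if_neg (show ¬ start > end_ by omega), if_neg (show ¬ chunk_size ≤ 0 by omega)]
  rw [splitB_eq hcs ((end_ - start).toNat + 1) start end_ (by omega) hle]
  by_cases hsmall : end_ - start < chunk_size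
  · rw [if_pos hsmall, chunksOf_small hcs hle hsmall]
  · rw [if_neg hsmall]
    by_cases h1 : chunk_size = 1
    · rw [if_pos h1, h1]
      unfold chunksOf
      exact List.map_congr_left (fun x hx => by
        obtain ⟨hx1, hx2⟩ := (PySem.List.mem_pyRange_one).mp hx
        rw [show min (x + 1 - 1) end_ = x by omega])
    · rw [if_neg h1, chunkLoopA_eq hcs end_ ((end_ + 1 - start).toNat) start le_rfl]
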